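-- pv_equiv track=rewrite | github.com/matheusF23/ia-codes | modulo1/quebra_cabeca.py | acoes
-- ===== SOURCE A (Python) =====
-- def acoes(estado):
--     """Recebe um estado e retorna as ações possiveis"""
--     linha1 = estado[0]
--     linha2 = estado[1]
--     linha3 = estado[2]
--     if (0 in linha1):
--         for indice, valor in enumerate(linha1):
--             if(valor == 0):
--                 if(indice == 0):
--                     return ['baixo', 'direita']
--                 elif(indice == 1):
--                     return ['baixo', 'esquerda', 'direita']
--                 else:
--                     return ['baixo', 'esquerda']
--     elif (0 in linha2):
--         for indice, valor in enumerate(linha2):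
--             if(valor == 0):
--                 if(indice == 0):
--                     return ['baixo', 'direita', 'cima']
--                 elif(indice == 1):
--                     return ['baixo', 'esquerda', 'direita', 'cima']
--                 else:
--                     return ['baixo', 'esquerda', 'cima']
--     elif (0 in linha3):
--         for indice, valor in enumerate(linha3):
--             if(valor == 0):
--                 if(indice == 0):
--                     return ['cima', 'direita']
--                 elif(indice == 1):
--                     return ['cima', 'esquerda', 'direita']
--                 else:
--                     return ['cima', 'esquerda']
-- ===== SOURCE B (Python) =====
-- def acoes(estado):
--     """Recebe um estado e retorna as ações possiveis"""
--     for r in range(3):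
--         try:
--             c = estado[r].index(0)
--         except ValueError:
--             continue
--         vertical = [m for m, nr in (('baixo', r + 1), ('cima', r - 1)) if 0 <= nr <= 2]
--         horizontal = [m for m, ok in (('esquerda', c >= 1), ('direita', c <= 1)) if ok]
--         return vertical[:1] + horizontal + vertical[1:]
--     return None
-- ===== Notes on version B (the rewrite author's own statement) =====
-- stated objective: alternative
-- what changed: Replaces A's three copied nine-branch tables with the generic direction-vector method: find the blank, filter direction vectors by legality (vertical by neighbour-row bounds, left/right by column position), and splice verticals around horizontals to get A's ordering.
-- outside the precondition, e.g. on acoes([[1, 2, 3], [4, 5, 6], [7, 8, 1]]): A returns None, B returns None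
import Mathlib
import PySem

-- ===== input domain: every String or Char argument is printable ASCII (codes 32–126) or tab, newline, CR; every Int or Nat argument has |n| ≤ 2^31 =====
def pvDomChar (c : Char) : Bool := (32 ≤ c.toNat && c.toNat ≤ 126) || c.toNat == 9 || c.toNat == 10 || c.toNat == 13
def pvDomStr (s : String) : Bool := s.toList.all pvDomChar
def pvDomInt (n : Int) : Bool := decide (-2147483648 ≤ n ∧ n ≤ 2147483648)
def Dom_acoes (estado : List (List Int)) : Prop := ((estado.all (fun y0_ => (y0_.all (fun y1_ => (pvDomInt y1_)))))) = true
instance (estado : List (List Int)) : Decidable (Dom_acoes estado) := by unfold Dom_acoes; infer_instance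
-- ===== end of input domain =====

-- B replaces A's three copied nine-branch tables with the generic direction-vector method
-- (filter direction vectors by legality, splice verticals around horizontals); same value on Pre_.

-- ===== PORT A =====
-- the 'for indice, valor in enumerate(linha)' loop of A, returning r0/r1/r2 at the first zero by its index
def acoesLoop (r0 r1 r2 : List String) (idx : Nat) : List Int → List String
  | [] => []
  | v :: rest =>
    if v = 0 then
      (if idx = 0 then r0 else if idx = 1 then r1 else r2)
    else acoesLoop r0 r1 r2 (idx + 1) rest

def acoes (estado : List (List Int)) : List String :=
  match PySem.List.pyGet? estado 0, PySem.List.pyGet? estado 1, PySem.List.pyGet? estado 2 with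
  | some linha1, some linha2, some linha3 =>
    if (0 : Int) ∈ linha1 then
      acoesLoop ["baixo", "direita"] ["baixo", "esquerda", "direita"] ["baixo", "esquerda"] 0 linha1
    else if (0 : Int) ∈ linha2 then
      acoesLoop ["baixo", "direita", "cima"] ["baixo", "esquerda", "direita", "cima"] ["baixo", "esquerda", "cima"] 0 linha2
    else if (0 : Int) ∈ linha3 then
      acoesLoop ["cima", "direita"] ["cima", "esquerda", "direita"] ["cima", "esquerda"] 0 linha3
    else []  -- Python falls through and returns None here; excluded by Pre_acoes
  | _, _, _ => []  -- Python raises IndexError here; excluded by Pre_acoes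

-- ===== PORT B =====
-- the body of Source B's 'for r in range(3)' loop, recursing over the remaining r values
def acoesScan (estado : List (List Int)) : List Int → List String
  | [] => []  -- Source B returns None here; excluded by Pre_acoes
  | r :: rs =>
    match PySem.List.pyGet? estado r with
    | none => []  -- Python raises IndexError here; excluded by Pre_acoes
    | some row =>
      match PySem.List.index? row 0 with
      | none => acoesScan estado rs  -- ValueError: continue
      | some c =>
        let vertical :=
          ((([("baixo", r + 1), ("cima", r - 1)] : List (String × Int)).filter
              (fun p => decide (0 ≤ p.2 ∧ p.2 ≤ 2))).map Prod.fst)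
        let horizontal :=
          ((([("esquerda", decide (1 ≤ c)), ("direita", decide (c ≤ 1))] : List (String × Bool)).filter
              Prod.snd).map Prod.fst)
        PySem.List.slice vertical none (some 1) ++ horizontal ++
          PySem.List.slice vertical (some 1) none

def acoes_alt (estado : List (List Int)) : List String :=
  acoesScan estado (PySem.List.pyRange 0 3 1)

-- ===== PRECONDITION & SPEC =====
-- Pre_ excludes inputs with fewer than 3 rows (A raises IndexError) and inputs whose first three
-- rows contain no 0 (A falls through and returns None, not a list).
def Pre_acoes (estado : List (List Int)) : Prop :=
  3 ≤ estado.length ∧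
    ((0 : Int) ∈ estado.getD 0 [] ∨ (0 : Int) ∈ estado.getD 1 [] ∨ (0 : Int) ∈ estado.getD 2 [])
instance (estado : List (List Int)) : Decidable (Pre_acoes estado) := by unfold Pre_acoes; infer_instance

def pvWitness_acoes : List (List Int) := [[1, 2, 3], [4, 0, 6], [7, 8, 5]]

def Spec_acoes (estado : List (List Int)) (out : List String) : Prop := out = acoes_alt estado
instance (estado : List (List Int)) (out : List String) : Decidable (Spec_acoes estado out) := by unfold Spec_acoes; infer_instance

-- ===== CLAIM (what is proved, stated in full; the proofs are below) =====
def Claim_equal_acoes : Prop := ∀ (estado : List (List Int)), Dom_acoes estado → Pre_acoes estado → Spec_acoes estado (acoes estado)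

-- ===== LEMMAS AND PROOFS =====
theorem acoesLoop_eq (r0 r1 r2 : List String) (l : List Int) (h : (0 : Int) ∈ l) (idx : Nat) :
    acoesLoop r0 r1 r2 idx l =
      (let c := idx + (PySem.List.index? l 0).getD 0
       if c = 0 then r0 else if c = 1 then r1 else r2) := by
  induction l generalizing idx with
  | nil => cases h
  | cons v rest ih =>
    by_cases hv : v = (0 : Int)
    · subst hv
      rw [PySem.List.index?_cons_self]
      simp [acoesLoop]
    · have hmem : (0 : Int) ∈ rest := by
        cases List.mem_cons.mp h with
        | inl h0 => exact absurd (Eq.symm h0) hv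
        | inr h0 => exact h0
      rw [PySem.List.index?_cons_of_ne rest hv]
      obtain ⟨k, hk⟩ := Option.isSome_iff_exists.mp
        ((PySem.List.index?_isSome_iff rest (0 : Int)).mpr hmem)
      simp only [acoesLoop, if_neg hv, ih hmem, hk, Option.map_some, Option.getD_some]
      have harith : idx + 1 + k = idx + (k + 1) := by omega
      rw [harith]

-- index? gives none exactly when 0 is absent
theorem index?_none_of_not_mem (l : List Int) (h : (0 : Int) ∉ l) :
    PySem.List.index? l 0 = none := by
  cases hi : PySem.List.index? l 0 with
  | none => rfl
  | some c =>
    exact absurd ((PySem.List.index?_isSome_iff l (0 : Int)).mp (by rw [hi]; rfl)) h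

theorem acoes_spec : Claim_equal_acoes := by
  intro estado _hdom hpre
  obtain ⟨hlen, hz⟩ := hpre
  match estado, hlen with
  | l1 :: l2 :: l3 :: rest, _ =>
    simp only [List.getD, List.getElem?_cons_zero, List.getElem?_cons_succ, Option.getD_some] at hz
    have hrange : PySem.List.pyRange 0 3 1 = [0, 1, 2] := by decide
    have g1 : PySem.List.pyGet? (l1 :: l2 :: l3 :: rest) 1 = some l2 := by
      rw [show (1 : Int) = ((1 : Nat) : Int) by norm_num, PySem.List.pyGet?_natCast]; rfl
    have g2 : PySem.List.pyGet? (l1 :: l2 :: l3 :: rest) 2 = some l3 := by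
      rw [show (2 : Int) = ((2 : Nat) : Int) by norm_num, PySem.List.pyGet?_natCast]; rfl
    unfold Spec_acoes acoes acoes_alt
    rw [hrange]
    simp only [PySem.List.pyGet?_zero_cons, g1, g2]
    by_cases h1 : (0 : Int) ∈ l1
    · obtain ⟨c, hc⟩ := Option.isSome_iff_exists.mp ((PySem.List.index?_isSome_iff l1 (0 : Int)).mpr h1)
      simp only [acoesScan, PySem.List.pyGet?_zero_cons, g1, g2, hc, if_pos h1,
                 acoesLoop_eq _ _ _ _ h1]
      rcases Nat.lt_or_ge c 2 with hlt | hge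
      · interval_cases c <;> simp [PySem.List.slice]
      · simp [show c ≠ 0 by omega, show c ≠ 1 by omega, show ¬ c ≤ 1 by omega,
              show 1 ≤ c by omega, PySem.List.slice]
    · by_cases h2 : (0 : Int) ∈ l2
      · obtain ⟨c, hc⟩ := Option.isSome_iff_exists.mp ((PySem.List.index?_isSome_iff l2 (0 : Int)).mpr h2)
        simp only [acoesScan, PySem.List.pyGet?_zero_cons, g1, g2,
                   index?_none_of_not_mem l1 h1, hc, if_neg h1, if_pos h2,
                   acoesLoop_eq _ _ _ _ h2]
        rcases Nat.lt_or_ge c 2 with hlt | hge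
        · interval_cases c <;> simp [PySem.List.slice]
        · simp [show c ≠ 0 by omega, show c ≠ 1 by omega, show ¬ c ≤ 1 by omega,
                show 1 ≤ c by omega, PySem.List.slice]
      · have h3 : (0 : Int) ∈ l3 := by tauto
        obtain ⟨c, hc⟩ := Option.isSome_iff_exists.mp ((PySem.List.index?_isSome_iff l3 (0 : Int)).mpr h3)
        simp only [acoesScan, PySem.List.pyGet?_zero_cons, g1, g2,
                   index?_none_of_not_mem l1 h1, index?_none_of_not_mem l2 h2, hc,
                   if_neg h1, if_neg h2, if_pos h3, acoesLoop_eq _ _ _ _ h3]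
        rcases Nat.lt_or_ge c 2 with hlt | hge
        · interval_cases c <;> simp [PySem.List.slice]
        · simp [show c ≠ 0 by omega, show c ≠ 1 by omega, show ¬ c ≤ 1 by omega,
                show 1 ≤ c by omega, PySem.List.slice]
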